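-- pv_equiv track=rewrite | github.com/mbauer83/assisted-architecture-management | src/tools/artifact_write/parse_existing.py | _extract_notes
-- ===== SOURCE A (Python) =====
-- def _extract_notes(content_section: str) -> str | None:
--     """Extract content from the Notes section."""
--     lines = content_section.splitlines()
--     in_notes = False
--     notes_lines: list[str] = []
--
--     for line in lines:
--         stripped = line.strip()
--         if stripped == "## Notes":
--             in_notes = True
--             continue
--         if in_notes:
--             if stripped.startswith("## "):
--                 break
--             notes_lines.append(line)
--
--     text = "\n".join(notes_lines).strip()
--     return text if text else None
-- ===== SOURCE B (Python) =====
-- def _extract_notes(content_section: str) -> str | None: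
--     """Extract the body of the '## Notes' section by computing its boundaries."""
--     lines = content_section.splitlines()
--     try:
--         i = next(k for k, line in enumerate(lines) if line.strip() == "## Notes")
--     except StopIteration:
--         return None
--     body = lines[i + 1:]
--     j = next((k for k, line in enumerate(body)
--               if line.strip().startswith("## ")), len(body))
--     text = "\n".join(body[:j]).strip()
--     return text or None
-- ===== Notes on version B (the rewrite author's own statement) =====
-- stated objective: alternative
-- what changed: Replaces A's single stateful flag-and-break accumulation pass by a boundary decomposition (find the '## Notes' header index, find the next section-header index, join one slice); Pre_ excludes content with more than one line stripping to '## Notes', where A's skipping of a repeated header and merging content across it is an accidental corner and B's stop-at-next-header is equally defensible.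
-- outside the precondition, e.g. on _extract_notes('## Notes\na\n## Notes\nb'): A returns 'a\nb', B returns 'a'; on _extract_notes('## Notes\n## Notes\nx'): A returns 'x', B returns None
import Mathlib
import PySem

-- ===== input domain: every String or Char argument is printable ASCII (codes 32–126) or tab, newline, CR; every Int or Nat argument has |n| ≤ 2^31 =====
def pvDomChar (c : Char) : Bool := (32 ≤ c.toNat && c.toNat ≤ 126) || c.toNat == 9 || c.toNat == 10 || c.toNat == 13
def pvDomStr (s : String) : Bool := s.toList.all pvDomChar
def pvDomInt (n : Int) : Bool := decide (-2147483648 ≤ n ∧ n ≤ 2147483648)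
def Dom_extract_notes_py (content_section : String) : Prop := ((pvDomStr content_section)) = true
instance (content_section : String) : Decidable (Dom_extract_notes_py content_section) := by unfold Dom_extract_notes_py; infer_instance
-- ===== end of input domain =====

-- B computes the section boundaries first (header index, then the next section header)
-- and joins one slice, instead of A's stateful flag-and-break accumulation; objective: alternative.

-- ===== PORT A =====
-- A's for-loop: state = (in_notes, notes_lines); returning acc early is the `break`
def pvLoopA : List String → Bool → List String → List String
  | [], _, acc => acc
  | l :: rest, inNotes, acc =>
    let stripped := PySem.Str.strip l
    if stripped == "## Notes" then pvLoopA rest true acc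
    else if inNotes then
      if PySem.Str.startswith stripped "## " then acc
      else pvLoopA rest inNotes (acc ++ [l])
    else pvLoopA rest inNotes acc

def extract_notes_py (content_section : String) : Option String :=
  let lines := PySem.Str.splitlines content_section
  let notes_lines := pvLoopA lines false []
  let text := PySem.Str.strip (PySem.Str.join "\n" notes_lines)
  if text == "" then none else some text

-- ===== PORT B =====
-- port of Source B's `next((k for k, line in enumerate(ls) if p(line)), <default>)`
def pvIdx? (p : String → Bool) : List String → Option Nat
  | [] => none
  | l :: r => if p l then some 0 else (pvIdx? p r).map (· + 1)

def extract_notes_py_alt (content_section : String) : Option String :=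
  let lines := PySem.Str.splitlines content_section
  match pvIdx? (fun line => PySem.Str.strip line == "## Notes") lines with
  | none => none
  | some i =>
    let body := PySem.List.slice lines (some ((i : Int) + 1)) none
    let j : Int :=
      match pvIdx? (fun line => PySem.Str.startswith (PySem.Str.strip line) "## ") body with
      | none => PySem.List.len body
      | some k => (k : Int)
    let text := PySem.Str.strip (PySem.Str.join "\n" (PySem.List.slice body none (some j)))
    if text == "" then none else some text

-- ===== PRECONDITION & SPEC =====
-- Pre_ excludes inputs containing more than one line that strips to "## Notes": on such
-- duplicated section headers A skips the repeated header and merges content across it while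
-- B treats it as the start of the next section — a corner where either reading is defensible.
def Pre_extract_notes_py (content_section : String) : Prop :=
  ((PySem.Str.splitlines content_section).filter
    (fun line => PySem.Str.strip line == "## Notes")).length ≤ 1
instance (content_section : String) : Decidable (Pre_extract_notes_py content_section) := by unfold Pre_extract_notes_py; infer_instance

def pvWitness_extract_notes_py : String := "## Notes\nhello\n## Next\nx"

def Spec_extract_notes_py (content_section : String) (out : Option String) : Prop := out = extract_notes_py_alt content_section
instance (content_section : String) (out : Option String) : Decidable (Spec_extract_notes_py content_section out) := by unfold Spec_extract_notes_py; infer_instance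

-- ===== CLAIM (what is proved, stated in full; the proofs are below) =====
def Claim_equal_extract_notes_py : Prop := ∀ (content_section : String), Dom_extract_notes_py content_section → Pre_extract_notes_py content_section → Spec_extract_notes_py content_section (extract_notes_py content_section)

-- ===== LEMMAS AND PROOFS =====

-- the two predicates of the scans
def pvHdr (l : String) : Bool := PySem.Str.strip l == "## Notes"
def pvStop (l : String) : Bool := PySem.Str.startswith (PySem.Str.strip l) "## "

-- what A collects once in_notes is true
def pvCollect : List String → List String
  | [] => []
  | l :: r =>
    if pvHdr l then pvCollect r
    else if pvStop l then []
    else l :: pvCollect r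

theorem pvLoopA_true (ls : List String) : ∀ acc, pvLoopA ls true acc = acc ++ pvCollect ls := by
  induction ls with
  | nil => intro acc; simp [pvLoopA, pvCollect]
  | cons l r ih =>
    intro acc
    by_cases h1 : PySem.Str.strip l = "## Notes"
    · simp [pvLoopA, pvCollect, pvHdr, h1, ih]
    · by_cases h2 : pvStop l = true
      · simp [pvLoopA, pvCollect, pvHdr, pvStop, h1] at *
        simp [h2]
      · simp [pvLoopA, pvCollect, pvHdr, pvStop, h1, ih] at *
        simp [h2]

theorem pvLoopA_false (ls : List String) :
    pvLoopA ls false [] =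
      match pvIdx? pvHdr ls with
      | none => []
      | some n => pvCollect (ls.drop (n + 1)) := by
  induction ls with
  | nil => simp [pvLoopA, pvIdx?]
  | cons l r ih =>
    by_cases h1 : PySem.Str.strip l = "## Notes"
    · simp [pvLoopA, pvIdx?, pvHdr, h1, pvLoopA_true]
    · cases h2 : pvIdx? pvHdr r <;>
        simp [pvLoopA, pvIdx?, pvHdr, h1, h2, ih]

theorem pvIdx?_drop_nohdr (p : String → Bool) (ls : List String) :
    ∀ n, pvIdx? p ls = some n → (ls.filter p).length ≤ 1 →
      ∀ l ∈ ls.drop (n + 1), p l = false := by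
  induction ls with
  | nil => intro n h; simp [pvIdx?] at h
  | cons l r ih =>
    intro n h hc
    simp only [pvIdx?] at h
    by_cases h1 : p l = true
    · simp only [h1, if_true, Option.some.injEq] at h
      subst h
      simp only [List.filter, h1, List.length_cons] at hc
      have hnil : (r.filter p).length = 0 := by omega
      intro x hx
      by_contra hpx
      have hmem : x ∈ r.filter p :=
        List.mem_filter.2 ⟨List.mem_of_mem_drop hx, by simpa using hpx⟩
      rw [List.length_eq_zero_iff.1 hnil] at hmem
      simp at hmem
    · simp only [h1, if_false, Bool.false_eq_true, Option.map_eq_some_iff] at h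
      obtain ⟨m, hm, rfl⟩ := h
      have hc' : (r.filter p).length ≤ 1 := by
        simp only [List.filter, h1] at hc
        simpa using hc
      intro x hx
      exact ih m hm hc' x (by simpa using hx)

theorem pvCollect_nohdr (ls : List String) (h : ∀ l ∈ ls, pvHdr l = false) :
    pvCollect ls = ls.takeWhile (fun l => !pvStop l) := by
  induction ls with
  | nil => simp [pvCollect]
  | cons l r ih =>
    have hl : pvHdr l = false := h l (by simp)
    by_cases h2 : pvStop l = true
    · simp [pvCollect, hl, h2, List.takeWhile]
    · simp only [Bool.not_eq_true] at h2
      simp [pvCollect, hl, h2, List.takeWhile, ih (fun x hx => h x (by simp [hx]))]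

theorem pvTake_none (p : String → Bool) (ls : List String)
    (h : pvIdx? p ls = none) : ls.takeWhile (fun l => !p l) = ls := by
  induction ls with
  | nil => simp
  | cons l r ih =>
    simp only [pvIdx?] at h
    by_cases h1 : p l = true
    · simp [h1] at h
    · simp only [h1, if_false, Bool.false_eq_true, Option.map_eq_none_iff] at h
      simp [List.takeWhile, h1, ih h]

theorem pvTake_some (p : String → Bool) (ls : List String) :
    ∀ n : Nat, pvIdx? p ls = some n → ls.take n = ls.takeWhile (fun l => !p l) := by
  induction ls with
  | nil => intro n h; simp [pvIdx?] at h
  | cons l r ih =>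
    intro n h
    simp only [pvIdx?] at h
    by_cases h1 : p l = true
    · simp only [h1, if_true, Option.some.injEq] at h
      subst h
      simp [List.takeWhile, h1]
    · simp only [h1, if_false, Bool.false_eq_true, Option.map_eq_some_iff] at h
      obtain ⟨m, hm, rfl⟩ := h
      simp [List.takeWhile, h1, ih m hm]

theorem pvOut_congr (xs ys : List String) (h : xs = ys) :
    (if (PySem.Str.strip (PySem.Str.join "\n" xs) == "") = true then none
     else some (PySem.Str.strip (PySem.Str.join "\n" xs))) =
    (if (PySem.Str.strip (PySem.Str.join "\n" ys) == "") = true then none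
     else some (PySem.Str.strip (PySem.Str.join "\n" ys))) := by
  subst h; rfl

-- ===== VERDICT (by name: the statement is the Claim_ definition above) =====
theorem extract_notes_py_spec : Claim_equal_extract_notes_py := by
  intro c _ hpre
  unfold Spec_extract_notes_py extract_notes_py extract_notes_py_alt
  unfold Pre_extract_notes_py at hpre
  have ehdr : (fun line => PySem.Str.strip line == "## Notes") = pvHdr := rfl
  have estop : (fun line => PySem.Str.startswith (PySem.Str.strip line) "## ") = pvStop := rfl
  rw [ehdr] at hpre ⊢
  rw [estop]
  generalize PySem.Str.splitlines c = lines at hpre ⊢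
  dsimp only
  rw [pvLoopA_false]
  cases h : pvIdx? pvHdr lines with
  | none =>
    dsimp only
    have he : PySem.Str.strip (PySem.Str.join "\n" ([] : List String)) = "" := by decide
    simp [he]
  | some n =>
    dsimp only
    have hslice : PySem.List.slice lines (some ((n : Int) + 1)) none = lines.drop (n + 1) := by
      rw [PySem.List.slice_from lines (by omega)]
      norm_num
    rw [hslice]
    have hnohdr : ∀ l ∈ lines.drop (n + 1), pvHdr l = false :=
      pvIdx?_drop_nohdr pvHdr lines n h hpre
    cases h2 : pvIdx? pvStop (lines.drop (n + 1)) with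
    | none =>
      dsimp only
      have hslice2 : PySem.List.slice (lines.drop (n + 1)) none
          (some (PySem.List.len (lines.drop (n + 1)))) = lines.drop (n + 1) := by
        rw [PySem.List.slice_to (lines.drop (n + 1)) (by simp [PySem.List.len])]
        simp [PySem.List.len]
      rw [hslice2]
      refine pvOut_congr _ _ ?_
      rw [pvCollect_nohdr _ hnohdr, pvTake_none pvStop _ h2]
    | some m =>
      dsimp only
      have hslice2 : PySem.List.slice (lines.drop (n + 1)) none (some ((m : Int))) =
          (lines.drop (n + 1)).take m := by
        rw [PySem.List.slice_to (lines.drop (n + 1)) (by omega)]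
        norm_num
      rw [hslice2]
      refine pvOut_congr _ _ ?_
      rw [pvCollect_nohdr _ hnohdr, pvTake_some pvStop _ m h2]
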